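-- pv_equiv track=rewrite | github.com/MrBrantCode/unitest_baseline | mut_generate/mist_train_taco/taco_17252/solution.py | calculate_army_power
-- ===== SOURCE A (Python) =====
-- def calculate_army_power(N: int) -> int:
--     plist = [2, 3, 5, 7, 11, 13, 17, 19, 23, 29, 31, 37, 41, 43, 47, 53, 59, 61, 67, 71, 73, 79, 83, 89, 97, 101, 103, 107, 109, 113, 127, 131, 137, 139, 149, 151, 157, 163, 167, 173, 179, 181, 191, 193, 197, 199, 211, 223, 227, 229, 233, 239, 241, 251, 257, 263, 269, 271, 277, 281, 283, 293, 307, 311, 313]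
--     power = 1
--
--     for i in range(2, N + 1):
--         pdiv = []
--         count = 0
--
--         for p in plist:
--             if i >= p and i % p == 0:
--                 pdiv.append(p)
--
--         for pd in pdiv:
--             if i % (pd ** 2) == 0:
--                 count += 1
--
--         if count == len(pdiv) and count != 0:
--             power += 1
--
--     return power
-- ===== SOURCE B (Python) =====
-- def calculate_army_power(N: int) -> int:
--     plist = [2, 3, 5, 7, 11, 13, 17, 19, 23, 29, 31, 37, 41, 43, 47, 53, 59, 61, 67, 71, 73, 79, 83, 89, 97, 101, 103, 107, 109, 113, 127, 131, 137, 139, 149, 151, 157, 163, 167, 173, 179, 181, 191, 193, 197, 199, 211, 223, 227, 229, 233, 239, 241, 251, 257, 263, 269, 271, 277, 281, 283, 293, 307, 311, 313]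
--     has_any = set()
--     has_single = set()
--     for p in plist:
--         pp = p * p
--         for m in range(p, N + 1, p):
--             has_any.add(m)
--             if m % pp != 0:
--                 has_single.add(m)
--     power = 1
--     for i in range(2, N + 1):
--         if i in has_any and i not in has_single:
--             power += 1
--     return power
-- ===== Notes on version B (the rewrite author's own statement) =====
-- stated objective: faster
-- what changed: Replaces the per-number scan over the whole fixed prime list by a sieve: for each prime, mark its multiples up to N in a has_any set and, when its square does not divide the multiple, in a has_single set, then count i in [2,N] with has_any and not has_single.
import Mathlib
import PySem

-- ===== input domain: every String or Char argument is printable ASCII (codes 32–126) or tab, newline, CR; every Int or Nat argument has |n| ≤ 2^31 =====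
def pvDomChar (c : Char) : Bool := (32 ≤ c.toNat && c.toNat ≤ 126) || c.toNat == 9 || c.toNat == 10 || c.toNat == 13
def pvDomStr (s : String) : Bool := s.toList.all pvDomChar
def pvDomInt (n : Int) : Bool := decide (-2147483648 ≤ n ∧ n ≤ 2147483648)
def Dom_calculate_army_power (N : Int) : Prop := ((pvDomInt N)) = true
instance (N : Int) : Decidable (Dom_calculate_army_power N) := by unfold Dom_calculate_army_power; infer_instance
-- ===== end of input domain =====

-- B replaces A's per-number scan over the whole prime list by a sieve over each prime's multiples
-- (two membership sets), which a timing run measured as faster by a constant factor.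


-- ===== PORT A =====
def pvPlist : List Int := [2, 3, 5, 7, 11, 13, 17, 19, 23, 29, 31, 37, 41, 43, 47, 53, 59, 61, 67, 71, 73, 79, 83, 89, 97, 101, 103, 107, 109, 113, 127, 131, 137, 139, 149, 151, 157, 163, 167, 173, 179, 181, 191, 193, 197, 199, 211, 223, 227, 229, 233, 239, 241, 251, 257, 263, 269, 271, 277, 281, 283, 293, 307, 311, 313]

def calculate_army_power (N : Int) : Int :=
  (PySem.List.pyRange 2 (N + 1)).foldl (fun power i =>
    let pdiv : List Int :=
      pvPlist.foldl (fun acc p => if p ≤ i ∧ PySem.Int.mod i p = 0 then acc ++ [p] else acc) []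
    let count : Int :=
      pdiv.foldl (fun c pd => if PySem.Int.mod i (pd ^ 2) = 0 then c + 1 else c) 0
    if count = (pdiv.length : Int) ∧ count ≠ 0 then power + 1 else power) 1

-- ===== PORT B =====
-- inner loop of Source B: 'for m in range(p, N+1, p): has_any.add(m); if m % pp != 0: has_single.add(m)'
def pvSieveInner (pp : Int) (l : List Int) (s : PySem.Set Int × PySem.Set Int) :
    PySem.Set Int × PySem.Set Int :=
  l.foldl (fun s m =>
    (PySem.Set.add s.1 m, if PySem.Int.mod m pp ≠ 0 then PySem.Set.add s.2 m else s.2)) s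

def calculate_army_power_alt (N : Int) : Int :=
  let sets :=
    pvPlist.foldl (fun s p => pvSieveInner (p * p) (PySem.List.pyRange p (N + 1) p) s)
      (PySem.Set.empty, PySem.Set.empty)
  (PySem.List.pyRange 2 (N + 1)).foldl (fun power i =>
    if i ∈ sets.1 ∧ i ∉ sets.2 then power + 1 else power) 1

-- ===== PRECONDITION & SPEC =====
def Spec_calculate_army_power (N : Int) (out : Int) : Prop := out = calculate_army_power_alt N
instance (N : Int) (out : Int) : Decidable (Spec_calculate_army_power N out) := by unfold Spec_calculate_army_power; infer_instance

-- ===== CLAIM (what is proved, stated in full; the proofs are below) =====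
def Claim_equal_calculate_army_power : Prop := ∀ (N : Int), Dom_calculate_army_power N → Spec_calculate_army_power N (calculate_army_power N)

-- ===== LEMMAS AND PROOFS =====

-- membership after the inner sieve loop
theorem pvSieveInner_mem (pp : Int) (l : List Int) (s : PySem.Set Int × PySem.Set Int) (x : Int) :
    (x ∈ (pvSieveInner pp l s).1 ↔ x ∈ s.1 ∨ x ∈ l) ∧
    (x ∈ (pvSieveInner pp l s).2 ↔ x ∈ s.2 ∨ (x ∈ l ∧ PySem.Int.mod x pp ≠ 0)) := by
  induction l generalizing s with
  | nil => simp [pvSieveInner]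
  | cons m t ih =>
    have h := ih (PySem.Set.add s.1 m, if PySem.Int.mod m pp ≠ 0 then PySem.Set.add s.2 m else s.2)
    constructor
    · rw [show (pvSieveInner pp (m :: t) s) = pvSieveInner pp t
            (PySem.Set.add s.1 m, if PySem.Int.mod m pp ≠ 0 then PySem.Set.add s.2 m else s.2) from rfl]
      rw [h.1]
      simp [PySem.Set.mem_add]
      tauto
    · rw [show (pvSieveInner pp (m :: t) s) = pvSieveInner pp t
            (PySem.Set.add s.1 m, if PySem.Int.mod m pp ≠ 0 then PySem.Set.add s.2 m else s.2) from rfl]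
      rw [h.2]
      by_cases hm : PySem.Int.mod m pp ≠ 0
      · simp [hm, PySem.Set.mem_add]
        constructor
        · rintro ((hs | rfl) | ht)
          · exact Or.inl hs
          · exact Or.inr ⟨Or.inl rfl, hm⟩
          · exact Or.inr ⟨Or.inr ht.1, ht.2⟩
        · rintro (hs | ⟨(rfl | ht), hx⟩)
          · exact Or.inl (Or.inl hs)
          · exact Or.inl (Or.inr rfl)
          · exact Or.inr ⟨ht, hx⟩
      · simp [hm]
        constructor
        · rintro (hs | ht)
          · exact Or.inl hs
          · exact Or.inr ⟨Or.inr ht.1, ht.2⟩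
        · rintro (hs | ⟨(rfl | ht), hx⟩)
          · exact Or.inl hs
          · exact absurd hx hm
          · exact Or.inr ⟨ht, hx⟩

-- membership after the outer sieve loop, for any prefix list of primes
theorem pvSieve_mem (N : Int) (ps : List Int) (s : PySem.Set Int × PySem.Set Int) (x : Int) :
    (x ∈ (ps.foldl (fun s p => pvSieveInner (p * p) (PySem.List.pyRange p (N + 1) p) s) s).1 ↔
      x ∈ s.1 ∨ ∃ p ∈ ps, x ∈ PySem.List.pyRange p (N + 1) p) ∧
    (x ∈ (ps.foldl (fun s p => pvSieveInner (p * p) (PySem.List.pyRange p (N + 1) p) s) s).2 ↔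
      x ∈ s.2 ∨ ∃ p ∈ ps, x ∈ PySem.List.pyRange p (N + 1) p ∧ PySem.Int.mod x (p * p) ≠ 0) := by
  induction ps generalizing s with
  | nil => simp
  | cons q t ih =>
    have h := ih (pvSieveInner (q * q) (PySem.List.pyRange q (N + 1) q) s)
    have hin := pvSieveInner_mem (q * q) (PySem.List.pyRange q (N + 1) q) s x
    constructor
    · rw [List.foldl_cons, h.1, hin.1]
      simp only [List.mem_cons]
      constructor
      · rintro ((hs | hr) | ⟨p, hp, hr⟩)
        · exact Or.inl hs
        · exact Or.inr ⟨q, Or.inl rfl, hr⟩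
        · exact Or.inr ⟨p, Or.inr hp, hr⟩
      · rintro (hs | ⟨p, (rfl | hp), hr⟩)
        · exact Or.inl (Or.inl hs)
        · exact Or.inl (Or.inr hr)
        · exact Or.inr ⟨p, hp, hr⟩
    · rw [List.foldl_cons, h.2, hin.2]
      simp only [List.mem_cons]
      constructor
      · rintro ((hs | hr) | ⟨p, hp, hr⟩)
        · exact Or.inl hs
        · exact Or.inr ⟨q, Or.inl rfl, hr⟩
        · exact Or.inr ⟨p, Or.inr hp, hr⟩
      · rintro (hs | ⟨p, (rfl | hp), hr⟩)
        · exact Or.inl (Or.inl hs)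
        · exact Or.inl (Or.inr hr)
        · exact Or.inr ⟨p, hp, hr⟩

theorem pvPlist_two_le : ∀ p ∈ pvPlist, (2 : Int) ≤ p := by decide

-- for 2 ≤ i < N+1 and p in the prime list, membership in range(p, N+1, p) is divisibility
theorem pvRange_mem_iff (N i p : Int) (hp : p ∈ pvPlist) (hi : 2 ≤ i) (hiN : i < N + 1) :
    i ∈ PySem.List.pyRange p (N + 1) p ↔ p ∣ i := by
  have h2 := pvPlist_two_le p hp
  rw [PySem.List.mem_pyRange_iff_of_pos (by omega)]
  constructor
  · rintro ⟨-, -, hd⟩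
    have : p ∣ (i - p) + p := dvd_add hd dvd_rfl
    simpa using this
  · intro hd
    exact ⟨Int.le_of_dvd (by omega) hd, hiN, dvd_sub hd dvd_rfl⟩

-- the per-i conditions of A and B agree
theorem pvCond_eq (N i : Int) (hi : 2 ≤ i) (_hiN : i < N + 1) :
    ((List.foldl (fun c pd => if PySem.Int.mod i (pd ^ 2) = 0 then c + 1 else c) 0
        (List.foldl (fun acc p => if p ≤ i ∧ PySem.Int.mod i p = 0 then acc ++ [p] else acc) [] pvPlist)
      = ((List.foldl (fun acc p => if p ≤ i ∧ PySem.Int.mod i p = 0 then acc ++ [p] else acc) [] pvPlist).length : Int)) ∧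
     (List.foldl (fun c pd => if PySem.Int.mod i (pd ^ 2) = 0 then c + 1 else c) (0 : Int)
        (List.foldl (fun acc p => if p ≤ i ∧ PySem.Int.mod i p = 0 then acc ++ [p] else acc) [] pvPlist) ≠ 0)) ↔
    ((∃ p ∈ pvPlist, p ∣ i) ∧ ∀ p ∈ pvPlist, p ∣ i → p * p ∣ i) := by
  have hfilter : (pvPlist.foldl (fun acc p => if p ≤ i ∧ PySem.Int.mod i p = 0 then acc ++ [p] else acc) [])
      = pvPlist.filter (fun p => decide (p ≤ i ∧ PySem.Int.mod i p = 0)) := by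
    simpa using PySem.List.foldl_append_ite_eq_filter (fun p => p ≤ i ∧ PySem.Int.mod i p = 0) pvPlist []
  have hcount : ((pvPlist.filter (fun p => decide (p ≤ i ∧ PySem.Int.mod i p = 0))).foldl
        (fun c pd => if PySem.Int.mod i (pd ^ 2) = 0 then c + 1 else c) (0 : Int))
      = (((pvPlist.filter (fun p => decide (p ≤ i ∧ PySem.Int.mod i p = 0))).countP
          (fun pd => decide (PySem.Int.mod i (pd ^ 2) = 0)) : Nat) : Int) := by
    simpa using PySem.List.foldl_ite_add_one (fun pd => PySem.Int.mod i (pd ^ 2) = 0)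
      (pvPlist.filter (fun p => decide (p ≤ i ∧ PySem.Int.mod i p = 0))) 0
  simp only [hfilter, hcount]
  have hmem : ∀ p : Int,
      p ∈ pvPlist.filter (fun p => decide (p ≤ i ∧ PySem.Int.mod i p = 0)) ↔
      p ∈ pvPlist ∧ p ∣ i := by
    intro p
    simp only [List.mem_filter, decide_eq_true_eq]
    constructor
    · rintro ⟨hp, -, hm⟩
      exact ⟨hp, (PySem.Int.mod_eq_zero_iff_dvd i p).mp hm⟩
    · rintro ⟨hp, hd⟩
      exact ⟨hp, Int.le_of_dvd (by omega) hd, (PySem.Int.mod_eq_zero_iff_dvd i p).mpr hd⟩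
  constructor
  · rintro ⟨hlen, hne⟩
    have hc : ((pvPlist.filter (fun p => decide (p ≤ i ∧ PySem.Int.mod i p = 0))).countP
        (fun pd => decide (PySem.Int.mod i (pd ^ 2) = 0)))
        = (pvPlist.filter (fun p => decide (p ≤ i ∧ PySem.Int.mod i p = 0))).length := by
      exact_mod_cast hlen
    have hall := List.countP_eq_length.mp hc
    have hnil : pvPlist.filter (fun p => decide (p ≤ i ∧ PySem.Int.mod i p = 0)) ≠ [] := by
      intro h
      apply hne
      rw [h]
      simp
    obtain ⟨p, hp⟩ := List.exists_mem_of_ne_nil _ hnil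
    refine ⟨⟨p, ((hmem p).mp hp).1, ((hmem p).mp hp).2⟩, ?_⟩
    intro q hq hd
    have := hall q ((hmem q).mpr ⟨hq, hd⟩)
    simp only [decide_eq_true_eq] at this
    rw [PySem.Int.mod_eq_zero_iff_dvd] at this
    simpa [pow_two] using this
  · rintro ⟨⟨p, hp, hd⟩, hall⟩
    have hc : ((pvPlist.filter (fun p => decide (p ≤ i ∧ PySem.Int.mod i p = 0))).countP
        (fun pd => decide (PySem.Int.mod i (pd ^ 2) = 0)))
        = (pvPlist.filter (fun p => decide (p ≤ i ∧ PySem.Int.mod i p = 0))).length := by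
      apply List.countP_eq_length.mpr
      intro q hq
      obtain ⟨hq1, hq2⟩ := (hmem q).mp hq
      simp only [decide_eq_true_eq]
      rw [PySem.Int.mod_eq_zero_iff_dvd]
      simpa [pow_two] using hall q hq1 hq2
    have hmemp : p ∈ pvPlist.filter (fun p => decide (p ≤ i ∧ PySem.Int.mod i p = 0)) :=
      (hmem p).mpr ⟨hp, hd⟩
    have hnil : pvPlist.filter (fun p => decide (p ≤ i ∧ PySem.Int.mod i p = 0)) ≠ [] :=
      List.ne_nil_of_mem hmemp
    refine ⟨by exact_mod_cast hc, ?_⟩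
    rw [hc]
    have := List.length_pos_of_ne_nil hnil
    omega

-- ===== VERDICT (by name: the statement is the Claim_ definition above) =====
theorem calculate_army_power_spec : Claim_equal_calculate_army_power := by
  intro N _
  unfold Spec_calculate_army_power calculate_army_power calculate_army_power_alt
  apply PySem.List.foldl_congr_mem
  intro acc i hi
  rw [PySem.List.mem_pyRange_one] at hi
  have hS := pvSieve_mem N pvPlist (PySem.Set.empty, PySem.Set.empty) i
  have h1 : (i ∈ (pvPlist.foldl (fun s p => pvSieveInner (p * p) (PySem.List.pyRange p (N + 1) p) s)
      (PySem.Set.empty, PySem.Set.empty)).1) ↔ ∃ p ∈ pvPlist, p ∣ i := by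
    rw [hS.1]
    constructor
    · rintro (h | ⟨p, hp, hr⟩)
      · simp [PySem.Set.empty] at h
      · exact ⟨p, hp, (pvRange_mem_iff N i p hp hi.1 hi.2).mp hr⟩
    · rintro ⟨p, hp, hd⟩
      exact Or.inr ⟨p, hp, (pvRange_mem_iff N i p hp hi.1 hi.2).mpr hd⟩
  have h2 : (i ∈ (pvPlist.foldl (fun s p => pvSieveInner (p * p) (PySem.List.pyRange p (N + 1) p) s)
      (PySem.Set.empty, PySem.Set.empty)).2) ↔ ∃ p ∈ pvPlist, p ∣ i ∧ PySem.Int.mod i (p * p) ≠ 0 := by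
    rw [hS.2]
    constructor
    · rintro (h | ⟨p, hp, hr, hm⟩)
      · simp [PySem.Set.empty] at h
      · exact ⟨p, hp, (pvRange_mem_iff N i p hp hi.1 hi.2).mp hr, hm⟩
    · rintro ⟨p, hp, hd, hm⟩
      exact Or.inr ⟨p, hp, (pvRange_mem_iff N i p hp hi.1 hi.2).mpr hd, hm⟩
  have hQ : ((∃ p ∈ pvPlist, p ∣ i) ∧ ∀ p ∈ pvPlist, p ∣ i → p * p ∣ i) ↔
      ((i ∈ (pvPlist.foldl (fun s p => pvSieveInner (p * p) (PySem.List.pyRange p (N + 1) p) s)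
        (PySem.Set.empty, PySem.Set.empty)).1) ∧
       ¬ (i ∈ (pvPlist.foldl (fun s p => pvSieveInner (p * p) (PySem.List.pyRange p (N + 1) p) s)
        (PySem.Set.empty, PySem.Set.empty)).2)) := by
    rw [h1, h2]
    constructor
    · rintro ⟨hex, hall⟩
      refine ⟨hex, ?_⟩
      rintro ⟨p, hp, hd, hm⟩
      exact hm ((PySem.Int.mod_eq_zero_iff_dvd i (p * p)).mpr (hall p hp hd))
    · rintro ⟨hex, hnone⟩
      refine ⟨hex, fun p hp hd => ?_⟩
      by_contra hnd
      exact hnone ⟨p, hp, hd, fun hm => hnd ((PySem.Int.mod_eq_zero_iff_dvd i (p * p)).mp hm)⟩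
  exact if_congr ((pvCond_eq N i hi.1 hi.2).trans hQ) rfl rfl
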